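-- pv_equiv track=rewrite | github.com/cdelzotti/pandoc-markdown-admonitions | admonition.py | latexAdmonition
-- ===== SOURCE A (Python) =====
-- def latexAdmonition(text):
--     """
--     Convert every Markdown Extended Admonitions from text into latex tcolorbox boxes
--     Parameters
--     ----------
--     text : Text that must be tranformed (list)
--
--     Return
--     ------
--     String : text with Markdown Extended admonitions remplaced by latex tcolorbox boxes
--     """
--     # For each line
--     i = 0
--     while i < len(text):
--         # If the line is ong enough to contain an Admonition
--         if len(text[i]) > 3:
--             # If the line start with "!!!"
--             if  "!!!" in text[i]:
--                 # It's an admonition ! Now find the end !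
--                 # Find the starting pattern
--                 statingPattern = text[i].split("!")[0] + " "
--                 j = i + 1
--                 foundEnd = False
--                 while not foundEnd and j < len(text):
--                     if len(text[j]) < len(statingPattern):
--                         foundEnd = True
--                     elif text[j][0:len(statingPattern)] == statingPattern:
--                         j += 1
--                     else:
--                         foundEnd = True
--                 # End found !
--                 # Get box title
--                 title = ""
--                 parsedHeader = text[i].strip().split(" ")
--                 for k in range(2, len(parsedHeader)):
--                     title += parsedHeader[k] + " "
--                 # Change text
--                 ## Define title
--                 text[i] = "\\begin{tcolorbox}[title=%s,colframe=%s]\n" % (title, parsedHeader[1].upper())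
--                 ## Define end block
--                 text.insert(j, "\\end{tcolorbox}\n")
--                 i = j
--         i += 1
--     return text
-- ===== SOURCE B (Python) =====
-- END = "\\end{tcolorbox}\n"
--
--
-- def _begin_line(line):
--     header = line.strip().split(" ")
--     title = ""
--     for w in header[2:]:
--         title += w + " "
--     return "\\begin{tcolorbox}[title=%s,colframe=%s]\n" % (title, header[1].upper())
--
--
-- def latexAdmonition(text):
--     result = []
--     pat = None  # None = outside a box; else the continuation prefix
--     for line in text:
--         if pat is not None and not (len(line) >= len(pat) and line[:len(pat)] == pat):
--             # line breaks the block: close the box, then handle the line as outside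
--             result.append(END)
--             pat = None
--         if pat is None:
--             if len(line) > 3 and "!!!" in line:
--                 result.append(_begin_line(line))
--                 pat = line.split("!")[0] + " "
--             else:
--                 result.append(line)
--         else:
--             result.append(line)
--     if pat is not None:
--         result.append(END)
--     text[:] = result
--     return text
-- ===== Notes on version B (the rewrite author's own statement) =====
-- stated objective: simpler
-- what changed: Replaces A's index-juggling while loop (in-place overwrite, insert that shifts indices, jump i=j+1 so the block-ending line is re-scanned) by a single forward pass with an outside/inside-a-box state that rebuilds the list and assigns it with text[:]=result, preserving the in-place mutation.
import Mathlib
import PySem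

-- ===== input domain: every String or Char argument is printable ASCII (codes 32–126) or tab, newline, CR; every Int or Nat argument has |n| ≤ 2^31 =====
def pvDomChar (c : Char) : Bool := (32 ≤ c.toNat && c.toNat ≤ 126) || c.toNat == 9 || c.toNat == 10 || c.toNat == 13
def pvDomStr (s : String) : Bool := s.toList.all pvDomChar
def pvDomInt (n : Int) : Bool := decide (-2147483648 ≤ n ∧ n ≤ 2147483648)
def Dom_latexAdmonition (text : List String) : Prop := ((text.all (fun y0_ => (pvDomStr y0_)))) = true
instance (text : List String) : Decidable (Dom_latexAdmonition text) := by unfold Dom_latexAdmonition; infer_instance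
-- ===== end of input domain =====

-- B replaces A's index-juggling while loop (overwrite + insert that shifts indices +
-- jump so the closing line is re-scanned) by one forward pass with a state machine
-- (outside/inside a box) that rebuilds the list; same return value, and Source B keeps the
-- observable in-place mutation via text[:] = result. Objective: simpler.

-- ===== PORT A =====
-- inner while loop: find the first j ≥ i+1 whose line ends the block
def pvFindEnd (text : List String) (pat : String) (j : Nat) : Nat :=
  if _h : j < text.length then
    let line := text.getD j ""
    if PySem.Str.len line < PySem.Str.len pat then j
    else if PySem.Str.slice line (some 0) (some (PySem.Str.len pat)) == pat then
      pvFindEnd text pat (j + 1)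
    else j
  else j
termination_by text.length - j

theorem pvFindEnd_ge (text : List String) (pat : String) (j : Nat) :
    j ≤ pvFindEnd text pat j := by
  fun_induction pvFindEnd text pat j <;> omega

theorem pvFindEnd_le (text : List String) (pat : String) (j : Nat)
    (h : j ≤ text.length) : pvFindEnd text pat j ≤ text.length := by
  fun_induction pvFindEnd text pat j <;> omega

def pvLoopA (text : List String) (i : Nat) : List String :=
  if _h : i < text.length then
    let line := text.getD i ""
    if PySem.Str.len line > 3 then
      if PySem.Str.isIn "!!!" line then
        let pat := ((PySem.Str.split? line "!").getD []).getD 0 "" ++ " "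
        let j := pvFindEnd text pat (i + 1)
        let header := (PySem.Str.split? (PySem.Str.strip line) " ").getD []
        let title := (header.drop 2).foldl (fun acc w => acc ++ w ++ " ") ""
        -- parsedHeader[1] raises IndexError when absent; Pre_ excludes that, getD "" here
        let newLine := "\\begin{tcolorbox}[title=" ++ title ++ ",colframe=" ++
          PySem.Str.upper (header.getD 1 "") ++ "]\n"
        let text' := (text.set i newLine).insertIdx j "\\end{tcolorbox}\n"
        pvLoopA text' (j + 1)
      else pvLoopA text (i + 1)
    else pvLoopA text (i + 1)
  else text
termination_by text.length - i
decreasing_by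
  · have h1 := pvFindEnd_ge text (((PySem.Str.split? (text[i]?.getD "") "!").getD [])[0]?.getD "" ++ " ") (i + 1)
    have h2 := pvFindEnd_le text (((PySem.Str.split? (text[i]?.getD "") "!").getD [])[0]?.getD "" ++ " ") (i + 1) (by omega)
    simp [List.length_insertIdx]
    split <;> omega
  · omega
  · omega

def latexAdmonition (text : List String) : List String := pvLoopA text 0

-- ===== PORT B =====
def pvEndLine : String := "\\end{tcolorbox}\n"

def pvBeginLine (line : String) : String :=
  let header := (PySem.Str.split? (PySem.Str.strip line) " ").getD []
  let title := (header.drop 2).foldl (fun acc w => acc ++ w ++ " ") ""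
  "\\begin{tcolorbox}[title=" ++ title ++ ",colframe=" ++
    PySem.Str.upper (header.getD 1 "") ++ "]\n"

-- transcription of Source B's single for-loop: state = (result so far, current pattern or none)
def pvScanB (patOpt : Option String) (acc : List String) : List String → List String
  | [] =>
    match patOpt with
    | some _ => acc ++ [pvEndLine]
    | none => acc
  | line :: rest =>
    let st :=
      match patOpt with
      | some pat =>
        if !(PySem.Str.len line ≥ PySem.Str.len pat &&
              PySem.Str.slice line (some 0) (some (PySem.Str.len pat)) == pat) then
          (acc ++ [pvEndLine], (none : Option String))
        else (acc, some pat)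
      | none => (acc, (none : Option String))
    match st with
    | (acc₁, none) =>
      if PySem.Str.len line > 3 && PySem.Str.isIn "!!!" line then
        pvScanB (some (((PySem.Str.split? line "!").getD []).getD 0 "" ++ " "))
          (acc₁ ++ [pvBeginLine line]) rest
      else pvScanB none (acc₁ ++ [line]) rest
    | (acc₁, some pat) => pvScanB (some pat) (acc₁ ++ [line]) rest

def latexAdmonition_alt (text : List String) : List String := pvScanB none [] text

-- ===== PRECONDITION & SPEC =====
-- Pre_ excludes inputs where some admonition-looking line has a one-token header, on
-- which Python A raises IndexError at parsedHeader[1] (and B raises the same way);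
-- it is slightly conservative: such a line sitting INSIDE a block is skipped by both
-- programs, which then agree (see cites).
def Pre_latexAdmonition (text : List String) : Prop :=
  ∀ line ∈ text,
    (PySem.Str.len line > 3 ∧ PySem.Str.isIn "!!!" line = true) →
      2 ≤ ((PySem.Str.split? (PySem.Str.strip line) " ").getD []).length
instance (text : List String) : Decidable (Pre_latexAdmonition text) := by
  unfold Pre_latexAdmonition; infer_instance

def pvWitness_latexAdmonition : List String := ["!!! note Title", "!!! body text", "after"]

def Spec_latexAdmonition (text : List String) (out : List String) : Prop := out = latexAdmonition_alt text
instance (text : List String) (out : List String) : Decidable (Spec_latexAdmonition text out) := by unfold Spec_latexAdmonition; infer_instance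

-- ===== CLAIM (what is proved, stated in full; the proofs are below) =====
def Claim_equal_latexAdmonition : Prop := ∀ (text : List String), Dom_latexAdmonition text → Pre_latexAdmonition text → Spec_latexAdmonition text (latexAdmonition text)

-- ===== LEMMAS AND PROOFS =====

-- proof-layer view of B: the two states of pvScanB as mutually recursive functions
mutual
def pvOutside : List String → List String
  | [] => []
  | line :: rest =>
    if PySem.Str.len line > 3 && PySem.Str.isIn "!!!" line then
      pvBeginLine line ::
        pvInside (((PySem.Str.split? line "!").getD []).getD 0 "" ++ " ") rest
    else line :: pvOutside rest
  termination_by l => (l.length, 0)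

def pvInside (pat : String) : List String → List String
  | [] => [pvEndLine]
  | line :: rest =>
    if PySem.Str.len line ≥ PySem.Str.len pat &&
        PySem.Str.slice line (some 0) (some (PySem.Str.len pat)) == pat then
      line :: pvInside pat rest
    else pvEndLine :: pvOutside (line :: rest)
  termination_by l => (l.length, 1)
end



-- insertIdx as take/drop (no such lemma found in Mathlib)
theorem pvInsertIdx_eq (l : List String) (n : Nat) (h : n ≤ l.length) (e : String) :
    l.insertIdx n e = l.take n ++ e :: l.drop n := by
  induction l generalizing n with
  | nil => simp at h; simp [h]
  | cons a t ih =>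
    cases n with
    | zero => simp
    | succ m => simp at h; simp [List.insertIdx_succ_cons, ih m h]

theorem pvInside_spec (text : List String) (pat : String) (j0 : Nat) (h : j0 ≤ text.length) :
    pvInside pat (text.drop j0) =
      (text.drop j0).take (pvFindEnd text pat j0 - j0) ++
        pvEndLine :: pvOutside (text.drop (pvFindEnd text pat j0)) := by
  fun_induction pvFindEnd text pat j0 with
  | case1 j hlt line hshort =>
    have hline : line = text[j] := List.getD_eq_getElem text "" hlt
    rw [hline] at hshort
    rw [List.drop_eq_getElem_cons hlt, pvInside, if_neg ?_]
    · simp [← List.drop_eq_getElem_cons hlt]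
    · rw [Bool.and_eq_true, not_and]
      intro hge' _
      rw [decide_eq_true_eq] at hge'
      omega
  | case2 j hlt line hshort heq ih =>
    have hline : line = text[j] := List.getD_eq_getElem text "" hlt
    rw [hline] at hshort heq
    have hge := pvFindEnd_ge text pat (j+1)
    rw [List.drop_eq_getElem_cons hlt, pvInside,
        if_pos (by rw [Bool.and_eq_true]; exact ⟨decide_eq_true (by omega), heq⟩),
        ih (by omega)]
    have e : pvFindEnd text pat (j+1) - j = (pvFindEnd text pat (j+1) - (j+1)) + 1 := by omega
    rw [e, List.take_succ_cons]
    simp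
  | case3 j hlt line hshort hne =>
    have hline : line = text[j] := List.getD_eq_getElem text "" hlt
    rw [hline] at hne
    rw [List.drop_eq_getElem_cons hlt, pvInside, if_neg ?_]
    · simp [← List.drop_eq_getElem_cons hlt]
    · rw [Bool.and_eq_true, not_and]
      intro _ hsl
      exact hne hsl
  | case4 j hge =>
    have : j = text.length := by omega
    subst this
    simp [List.drop_length, pvInside, pvOutside]

theorem pvTakeSet (l : List String) (i J : Nat) (b : String) (hi : i < l.length)
    (h1 : i + 1 ≤ J) :
    (l.take i ++ b :: l.drop (i+1)).take J = l.take i ++ b :: (l.drop (i+1)).take (J-i-1) := by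
  rw [List.take_append]
  have e1 : min J i = i := by omega
  have e2 : min i l.length = i := by omega
  have e3 : J - i = (J - i - 1) + 1 := by omega
  rw [List.length_take, List.take_take, e1, e2, e3, List.take_succ_cons]
  simp

theorem pvDropSet (l : List String) (i J : Nat) (b : String) (hi : i < l.length)
    (h1 : i + 1 ≤ J) :
    (l.take i ++ b :: l.drop (i+1)).drop J = l.drop J := by
  rw [List.drop_append]
  have e2 : min i l.length = i := by omega
  have e3 : J - i = (J - i - 1) + 1 := by omega
  rw [List.length_take, e2, e3, List.drop_succ_cons, List.drop_drop,
      List.drop_eq_nil_of_le (by rw [List.length_take]; omega),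
      show i + 1 + (J - i - 1) = J by omega]
  simp

theorem pvTakeAfter (pre post : List String) (e : String) (J : Nat) (hJ : pre.length = J) :
    ((pre ++ e :: post).take (J+1)) = pre ++ [e] := by
  subst hJ; simp [List.take_append]

theorem pvDropAfter (pre post : List String) (e : String) (J : Nat) (hJ : pre.length = J) :
    ((pre ++ e :: post).drop (J+1)) = post := by
  subst hJ; simp [List.drop_append]

theorem pvLoopA_spec (text : List String) (i : Nat) :
    pvLoopA text i = text.take i ++ pvOutside (text.drop i) := by
  fun_induction pvLoopA text i with
  | case1 text i hi line hlen hin pat j header title newLine text' ih =>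
    have hline : line = text[i] := List.getD_eq_getElem text "" hi
    have hJge : i + 1 ≤ j := pvFindEnd_ge text pat (i+1)
    have hJle : j ≤ text.length := pvFindEnd_le text pat (i+1) (by omega)
    have htext' : text' = (text.take i ++ newLine :: (text.drop (i+1)).take (j-i-1)) ++
        pvEndLine :: text.drop j := by
      show (text.set i newLine).insertIdx j "\\end{tcolorbox}\n" = _
      rw [pvInsertIdx_eq _ j (by rw [List.length_set]; exact hJle),
          List.set_eq_take_cons_drop newLine hi,
          pvTakeSet text i j newLine hi hJge, pvDropSet text i j newLine hi hJge, pvEndLine]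
    have hpre : (text.take i ++ newLine :: (text.drop (i+1)).take (j-i-1)).length = j := by
      simp
      omega
    rw [ih, htext', pvTakeAfter _ _ _ _ hpre, pvDropAfter _ _ _ _ hpre,
        List.drop_eq_getElem_cons hi, pvOutside, if_pos ?_]
    · have hpat : ((PySem.Str.split? text[i] "!").getD []).getD 0 "" ++ " " = pat := by
        rw [← hline]
      have hb : pvBeginLine text[i] = newLine := by rw [← hline]; rfl
      rw [hpat, hb, pvInside_spec text pat (i+1) (by omega),
          show j - (i+1) = j - i - 1 from rfl]
      simp [List.append_assoc]
      rfl
    · rw [Bool.and_eq_true]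
      exact ⟨decide_eq_true (hline ▸ hlen), hline ▸ hin⟩
  | case2 text i hi line hlen hin ih =>
    have hline : line = text[i] := List.getD_eq_getElem text "" hi
    rw [hline] at hlen hin
    rw [ih, List.drop_eq_getElem_cons hi, pvOutside, if_neg ?_]
    · rw [List.take_add_one, List.getElem?_eq_getElem hi, Option.toList_some,
          List.append_assoc, List.singleton_append]
    · rw [Bool.and_eq_true, not_and]
      intro _ hc
      exact hin hc
  | case3 text i hi line hlen ih =>
    have hline : line = text[i] := List.getD_eq_getElem text "" hi
    rw [hline] at hlen
    rw [ih, List.drop_eq_getElem_cons hi, pvOutside, if_neg ?_]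
    · rw [List.take_add_one, List.getElem?_eq_getElem hi, Option.toList_some,
          List.append_assoc, List.singleton_append]
    · rw [Bool.and_eq_true, not_and]
      intro hc _
      rw [decide_eq_true_eq] at hc
      exact hlen hc
  | case4 text i hi =>
    have : text.length ≤ i := by omega
    simp [List.drop_eq_nil_of_le this, List.take_of_length_le this, pvOutside]

theorem pvScanB_spec (l : List String) :
    (∀ acc, pvScanB none acc l = acc ++ pvOutside l) ∧
    (∀ pat acc, pvScanB (some pat) acc l = acc ++ pvInside pat l) := by
  induction l with
  | nil =>
    constructor <;> intros <;> simp [pvScanB, pvOutside, pvInside]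
  | cons line rest ih =>
    obtain ⟨ihn, ihs⟩ := ih
    constructor
    · intro acc
      rw [pvScanB, pvOutside]
      by_cases hc : (PySem.Str.len line > 3 && PySem.Str.isIn "!!!" line) = true
      · simp only [hc, if_pos]
        rw [ihs]
        simp
      · rw [Bool.not_eq_true] at hc
        simp only [hc, Bool.false_eq_true, reduceIte]
        rw [ihn]
        simp
    · intro pat acc
      rw [pvScanB, pvInside]
      by_cases hm : (PySem.Str.len line ≥ PySem.Str.len pat &&
          PySem.Str.slice line (some 0) (some (PySem.Str.len pat)) == pat) = true
      · simp only [hm, Bool.not_true, Bool.false_eq_true, reduceIte]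
        rw [ihs]
        simp
      · rw [Bool.not_eq_true] at hm
        simp only [hm, Bool.not_false, if_pos]
        rw [pvOutside]
        by_cases hc : (PySem.Str.len line > 3 && PySem.Str.isIn "!!!" line) = true
        · simp only [hc, if_pos]
          rw [ihs]
          simp
        · rw [Bool.not_eq_true] at hc
          simp only [hc, Bool.false_eq_true, reduceIte]
          rw [ihn]
          simp

-- ===== VERDICT (by name: the statement is the Claim_ definition above) =====
theorem latexAdmonition_spec : Claim_equal_latexAdmonition := by
  intro text _ _
  unfold Spec_latexAdmonition latexAdmonition latexAdmonition_alt
  rw [pvLoopA_spec text 0, (pvScanB_spec text).1 []]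
  simp
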